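-- pv_equiv track=rewrite | github.com/TEAMLAB-Lecture/morsecode-alinghi | morsecode.py | is_validated_english_sentence
-- ===== SOURCE A (Python) =====
-- def is_validated_english_sentence(user_input):
--     count = 0
--     for ch in user_input:
--         if ch.isdigit():
--             return False
--         elif ch.isalpha():
--             count += 1
--         else:
--             if ch in ".,!? ":
--                 continue
--             else:
--                 return False
--     return count > 0
-- ===== SOURCE B (Python) =====
-- def is_validated_english_sentence(user_input):
--     stripped = "".join(c for c in user_input if c not in ".,!? ")
--     return stripped.isalpha()
-- ===== Notes on version B (the rewrite author's own statement) =====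
-- stated objective: idiomatic
-- what changed: Replaces the explicit counting loop with three early returns by a filter that drops the allowed punctuation/space characters followed by a single str.isalpha() test, which simultaneously rejects digits and any other leftover character and requires at least one letter.
import Mathlib
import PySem

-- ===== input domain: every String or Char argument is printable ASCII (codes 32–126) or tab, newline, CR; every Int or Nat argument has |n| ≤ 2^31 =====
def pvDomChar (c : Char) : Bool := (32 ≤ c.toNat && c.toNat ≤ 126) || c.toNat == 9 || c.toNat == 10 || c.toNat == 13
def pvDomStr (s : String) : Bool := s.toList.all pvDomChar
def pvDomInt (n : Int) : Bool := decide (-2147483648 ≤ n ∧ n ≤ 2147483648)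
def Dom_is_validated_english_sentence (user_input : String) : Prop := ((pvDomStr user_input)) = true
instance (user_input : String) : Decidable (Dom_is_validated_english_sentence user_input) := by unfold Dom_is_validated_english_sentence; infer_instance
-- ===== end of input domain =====

-- B replaces A's counting loop with a filter-then-isalpha test (idiomatic); proved equal on all inputs.


-- ===== PORT A =====
-- the for-loop with early returns, as structural recursion over the characters with the count accumulator
def pvLoopA : List Char → Nat → Bool
  | [], count => decide (count > 0)
  | ch :: rest, count =>
    if PySem.Chars.isdigit ch then false
    else if PySem.Chars.isalpha ch then pvLoopA rest (count + 1)
    else if (".,!? ".toList.contains ch) then pvLoopA rest count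
    else false

def is_validated_english_sentence (user_input : String) : Bool :=
  pvLoopA user_input.toList 0

-- ===== PORT B =====
-- "".join(c for c in user_input if c not in ".,!? ")  then  .isalpha()
def is_validated_english_sentence_alt (user_input : String) : Bool :=
  let stripped := String.ofList (user_input.toList.filter (fun c => !(".,!? ".toList.contains c)))
  PySem.Str.strIsalpha stripped

-- ===== PRECONDITION & SPEC =====
def Spec_is_validated_english_sentence (user_input : String) (out : Bool) : Prop := out = is_validated_english_sentence_alt user_input
instance (user_input : String) (out : Bool) : Decidable (Spec_is_validated_english_sentence user_input out) := by unfold Spec_is_validated_english_sentence; infer_instance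

-- ===== CLAIM (what is proved, stated in full; the proofs are below) =====
def Claim_equal_is_validated_english_sentence : Prop := ∀ (user_input : String), Dom_is_validated_english_sentence user_input → Spec_is_validated_english_sentence user_input (is_validated_english_sentence user_input)

-- ===== LEMMAS AND PROOFS =====

-- a digit character is neither a letter nor one of ".,!? "
theorem pv_digit_facts (c : Char) (h : PySem.Chars.isdigit c = true) :
    PySem.Chars.isalpha c = false ∧ (".,!? ".toList.contains c) = false := by
  have e0 : ('0').val.toNat = 48 := rfl
  have e9 : ('9').val.toNat = 57 := rfl
  have eA : ('A').val.toNat = 65 := rfl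
  have eZ : ('Z').val.toNat = 90 := rfl
  have ea : ('a').val.toNat = 97 := rfl
  have ez : ('z').val.toNat = 122 := rfl
  simp only [PySem.Chars.isdigit, Bool.and_eq_true, decide_eq_true_eq, Char.le_def,
    UInt32.le_iff_toNat_le, e0, e9] at h
  constructor
  · simp only [PySem.Chars.isalpha, PySem.Chars.isupper, PySem.Chars.islower,
      Bool.or_eq_false_iff, Bool.and_eq_false_iff, decide_eq_false_iff_not, Char.le_def,
      UInt32.le_iff_toNat_le, eA, eZ, ea, ez]
    omega
  · simp only [show (".,!? ".toList) = ['.', ',', '!', '?', ' '] from rfl,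
      List.contains_eq_mem, List.mem_cons, List.not_mem_nil, or_false, decide_eq_false_iff_not]
    intro hc
    rcases hc with h1 | h1 | h1 | h1 | h1 <;> subst h1 <;> simp_all
  
-- a letter is not one of ".,!? "
theorem pv_alpha_fact (c : Char) (h : PySem.Chars.isalpha c = true) :
    (".,!? ".toList.contains c) = false := by
  simp only [PySem.Chars.isalpha, PySem.Chars.isupper, PySem.Chars.islower,
    Bool.or_eq_true, Bool.and_eq_true, decide_eq_true_eq, Char.le_def] at h
  simp only [show (".,!? ".toList) = ['.', ',', '!', '?', ' '] from rfl,
    List.contains_eq_mem, List.mem_cons, List.not_mem_nil, or_false, decide_eq_false_iff_not]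
  intro hc
  rcases hc with h1 | h1 | h1 | h1 | h1 <;> subst h1 <;> simp_all

-- the loop of A computes "everything allowed and some letter seen", phrased through B's filter
theorem pv_loopA_eq (l : List Char) (count : Nat) :
    pvLoopA l count =
      ((l.filter (fun c => !(".,!? ".toList.contains c))).all PySem.Chars.isalpha &&
        (decide (0 < count) || !(l.filter (fun c => !(".,!? ".toList.contains c))).isEmpty)) := by
  induction l generalizing count with
  | nil => simp [pvLoopA]
  | cons c rest ih =>
    by_cases hd : PySem.Chars.isdigit c = true
    · obtain ⟨ha, hm⟩ := pv_digit_facts c hd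
      obtain ⟨h1, h2, h3, h4, h5⟩ : ¬c = '.' ∧ ¬c = ',' ∧ ¬c = '!' ∧ ¬c = '?' ∧ ¬c = ' ' := by
        simpa using hm
      simp [pvLoopA, hd, ha, h1, h2, h3, h4, h5]
    · simp only [Bool.not_eq_true] at hd
      by_cases ha : PySem.Chars.isalpha c = true
      · have hm := pv_alpha_fact c ha
        obtain ⟨h1, h2, h3, h4, h5⟩ : ¬c = '.' ∧ ¬c = ',' ∧ ¬c = '!' ∧ ¬c = '?' ∧ ¬c = ' ' := by
          simpa using hm
        simp [pvLoopA, hd, ha, ih, h1, h2, h3, h4, h5]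
      · simp only [Bool.not_eq_true] at ha
        by_cases hm : (".,!? ".toList.contains c) = true
        · have hmem : c = '.' ∨ c = ',' ∨ c = '!' ∨ c = '?' ∨ c = ' ' := by simpa using hm
          rcases hmem with h1 | h1 | h1 | h1 | h1 <;> subst h1 <;>
            simp [pvLoopA, hd, ha, ih]
        · simp only [Bool.not_eq_true] at hm
          obtain ⟨h1, h2, h3, h4, h5⟩ : ¬c = '.' ∧ ¬c = ',' ∧ ¬c = '!' ∧ ¬c = '?' ∧ ¬c = ' ' := by
            simpa using hm
          simp [pvLoopA, hd, ha, h1, h2, h3, h4, h5]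

-- ===== VERDICT (by name: the statement is the Claim_ definition above) =====
theorem is_validated_english_sentence_spec : Claim_equal_is_validated_english_sentence := by
  intro s _
  show is_validated_english_sentence s = is_validated_english_sentence_alt s
  simp only [is_validated_english_sentence, is_validated_english_sentence_alt, pv_loopA_eq]
  rw [show ∀ t : String, PySem.Str.strIsalpha t = PySem.Chars.strIsalpha t.toList from
    fun _ => rfl]
  simp [PySem.Chars.strIsalpha, Bool.and_comm]
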